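-- pv_equiv track=rewrite | github.com/jo3-l/advent | 2025/9.py | compact
-- ===== SOURCE A (Python) =====
-- def compact(xs):
--     N = len(xs)
--     i, j = 0, 0
--     while i < N:
--         xs[j] = xs[i]
--         j += 1
--
--         start = i
--         i += 1
--         while i < N and xs[i] == xs[start]:
--             i += 1
--     del xs[j:]
--     return xs
-- ===== SOURCE B (Python) =====
-- def compact(xs):
--     sentinel = object()
--     xs[:] = [cur for prev, cur in zip([sentinel] + xs, xs) if cur != prev]
--     return xs
-- ===== Notes on version B (the rewrite author's own statement) =====
-- stated objective: idiomatic
-- what changed: Replaces the two-pointer in-place overwrite loop with nested run-skipping scan by a single declarative comprehension that zips the list with a sentinel-shifted copy of itself and keeps each element differing from its predecessor, written back via xs[:] = ...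
import Mathlib
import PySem

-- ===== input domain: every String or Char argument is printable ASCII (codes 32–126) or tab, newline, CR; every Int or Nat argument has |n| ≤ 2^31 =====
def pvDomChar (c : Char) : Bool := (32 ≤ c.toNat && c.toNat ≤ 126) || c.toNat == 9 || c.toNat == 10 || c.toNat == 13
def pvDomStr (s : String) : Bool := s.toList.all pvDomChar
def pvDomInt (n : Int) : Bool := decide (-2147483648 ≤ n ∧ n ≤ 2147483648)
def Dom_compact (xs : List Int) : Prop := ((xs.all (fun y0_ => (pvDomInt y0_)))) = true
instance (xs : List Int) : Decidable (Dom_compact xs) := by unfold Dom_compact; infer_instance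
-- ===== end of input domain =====

-- B is the idiomatic rewrite: one zip-with-shifted-self comprehension written back with xs[:] = …;
-- both A and B mutate xs in place the same way, and the equivalence proved here is about the return value.

-- ===== PORT A =====
-- inner 'while i < N and xs[i] == xs[start]: i += 1'
def compactAdvance (xs : List Int) (N start i : Nat) : Nat :=
  if _h : i < N ∧ xs.getD i 0 = xs.getD start 0 then compactAdvance xs N start (i + 1) else i
termination_by N - i
decreasing_by omega

-- outer while loop over the mutable state (xs, i, j)
def compactLoop (xs : List Int) (N i j : Nat) : List Int × Nat :=
  if h : i < N then
    let xs' := xs.set j (xs.getD i 0)   -- xs[j] = xs[i]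
    let i' := compactAdvance xs' N i (i + 1)
    compactLoop xs' N i' (j + 1)
  else (xs, j)
termination_by N - i
decreasing_by
  have : i + 1 ≤ compactAdvance (xs.set j (xs.getD i 0)) N i (i + 1) := by
    generalize (xs.set j (xs.getD i 0)) = ys
    generalize hk : i + 1 = k
    have hik : i + 1 ≤ k := hk.le
    clear hk
    induction' hfuel : N - k with f ih generalizing k
    · unfold compactAdvance; split <;> omega
    · unfold compactAdvance; split
      · have := ih (k + 1) (by omega) (by omega); omega
      · omega
  omega

def compact (xs : List Int) : List Int :=
  let N := xs.length
  let r := compactLoop xs N 0 0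
  r.1.take r.2        -- del xs[j:]; return xs

-- ===== PORT B =====
-- Source B: xs[:] = [cur for prev, cur in zip([sentinel] + xs, xs) if cur != prev]; return xs
-- the sentinel pair always passes the test, which is the head case of this match
def compact_alt (xs : List Int) : List Int :=
  match xs with
  | [] => []
  | a :: rest => a :: ((((a :: rest).zip rest).filter (fun p => p.2 != p.1)).map Prod.snd)

-- ===== PRECONDITION & SPEC =====
def Spec_compact (xs : List Int) (out : List Int) : Prop := out = compact_alt xs
instance (xs : List Int) (out : List Int) : Decidable (Spec_compact xs out) := by unfold Spec_compact; infer_instance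

-- ===== CLAIM (what is proved, stated in full; the proofs are below) =====
def Claim_equal_compact : Prop := ∀ (xs : List Int), Dom_compact xs → Spec_compact xs (compact xs)

-- ===== LEMMAS AND PROOFS =====

-- reference form: collapse consecutive duplicate runs
def pvCollapse : List Int → List Int
  | [] => []
  | a :: rest => a :: pvCollapse (rest.dropWhile (· == a))
termination_by l => l.length
decreasing_by
  have := List.length_dropWhile_le (· == a) rest
  simp; omega

lemma take_set_succ (l : List Int) (j : Nat) (a : Int) (h : j < l.length) :
    (l.set j a).take (j + 1) = l.take j ++ [a] := by
  rw [List.set_eq_take_append_cons_drop, if_pos h]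
  rw [List.take_append]
  simp [Nat.min_eq_left h.le, List.take_of_length_le]

lemma getD_set_same (xs : List Int) (i j : Nat) (hi : i < xs.length) (hj : j ≤ i) :
    (xs.set j (xs.getD i 0)).getD i 0 = xs.getD i 0 := by
  by_cases hji : j = i
  · subst hji
    rw [List.getD_eq_getElem _ _ (by simpa), List.getElem_set_self]
  · rw [List.getD_eq_getElem _ _ (by simpa), List.getElem_set_ne hji _,
      ← List.getD_eq_getElem _ _ hi]

lemma advance_drop (xs : List Int) (start i : Nat) :
    xs.drop (compactAdvance xs xs.length start i) =
      (xs.drop i).dropWhile (· == xs.getD start 0) := by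
  induction' hfuel : xs.length - i with f ih generalizing i
  · unfold compactAdvance
    rw [dif_neg (by omega)]
    rw [List.drop_eq_nil_of_le (by omega), List.dropWhile_nil]
  · by_cases hi : i < xs.length
    · have hcons : xs.drop i = xs.getD i 0 :: xs.drop (i + 1) := by
        rw [List.getD_eq_getElem _ _ hi, List.drop_eq_getElem_cons hi]
      by_cases heq : xs.getD i 0 = xs.getD start 0
      · unfold compactAdvance
        rw [dif_pos ⟨hi, heq⟩]
        rw [ih (i + 1) (by omega), hcons,
          List.dropWhile_cons_of_pos (by simp only [beq_iff_eq]; exact heq)]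
      · unfold compactAdvance
        rw [dif_neg (by tauto)]
        rw [hcons, List.dropWhile_cons_of_neg (by simp only [beq_iff_eq]; exact heq), ← hcons]
    · omega

lemma loop_take (fuel : Nat) : ∀ (xs : List Int) (i j : Nat), xs.length - i ≤ fuel → j ≤ i →
    (compactLoop xs xs.length i j).1.take (compactLoop xs xs.length i j).2 =
      xs.take j ++ pvCollapse (xs.drop i) := by
  induction fuel with
  | zero =>
    intro xs i j hf hj
    unfold compactLoop
    rw [dif_neg (by omega)]
    rw [List.drop_eq_nil_of_le (by omega)]
    simp [pvCollapse]
  | succ f ih =>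
    intro xs i j hf hj
    by_cases hi : i < xs.length
    · have hjN : j < xs.length := by omega
      have hlen : (xs.set j (xs.getD i 0)).length = xs.length := by simp
      have hdropsucc : (xs.set j (xs.getD i 0)).drop (i + 1) = xs.drop (i + 1) :=
        List.drop_set_of_lt (by omega)
      have hgetDi := getD_set_same xs i j hi hj
      have hdropi : xs.drop i = xs.getD i 0 :: xs.drop (i + 1) := by
        rw [List.getD_eq_getElem _ _ hi, List.drop_eq_getElem_cons hi]
      have hige : i + 1 ≤ compactAdvance (xs.set j (xs.getD i 0)) xs.length i (i + 1) := by
        generalize (xs.set j (xs.getD i 0)) = ys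
        generalize hk : i + 1 = k
        have hik : i + 1 ≤ k := hk.le
        clear hk
        induction' hfuel2 : xs.length - k with f2 ih2 generalizing k
        · unfold compactAdvance; split <;> omega
        · unfold compactAdvance; split
          · have := ih2 (k + 1) (by omega) (by omega); omega
          · omega
      have hadv := advance_drop (xs.set j (xs.getD i 0)) i (i + 1)
      rw [hlen] at hadv
      unfold compactLoop
      rw [dif_pos hi]
      simp only []
      have hres := ih (xs.set j (xs.getD i 0))
        (compactAdvance (xs.set j (xs.getD i 0)) xs.length i (i + 1)) (j + 1)
        (by rw [hlen]; omega) (by omega)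
      rw [hlen] at hres
      rw [hres, hadv, hdropsucc, hgetDi, take_set_succ _ _ _ hjN, hdropi]
      conv_rhs => rw [pvCollapse]
      simp
    · unfold compactLoop
      rw [dif_neg (by omega)]
      rw [List.drop_eq_nil_of_le (by omega)]
      simp [pvCollapse]

lemma collapse_eq_zip (l : List Int) (a : Int) :
    pvCollapse (a :: l) =
      a :: ((((a :: l).zip l).filter (fun p => p.2 != p.1)).map Prod.snd) := by
  induction l generalizing a with
  | nil => simp [pvCollapse]
  | cons b t ih =>
    by_cases hba : b = a
    · subst hba
      have h1 : pvCollapse (b :: b :: t) = pvCollapse (b :: t) := by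
        rw [pvCollapse]
        rw [List.dropWhile_cons_of_pos (by simp)]
        conv_rhs => rw [pvCollapse]
      rw [h1, ih b]
      congr 1
      rw [show (b :: b :: t).zip (b :: t) = (b, b) :: (b :: t).zip t from rfl]
      rw [List.filter_cons_of_neg (by simp)]
    · rw [pvCollapse,
        List.dropWhile_cons_of_neg (by simp only [beq_iff_eq]; exact hba), ih b]
      rw [show (a :: b :: t).zip (b :: t) = (a, b) :: (b :: t).zip t from rfl]
      rw [List.filter_cons_of_pos (by simp only [bne_iff_ne, ne_eq]; exact hba)]
      simp

-- ===== VERDICT (by name: the statement is the Claim_ definition above) =====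
theorem compact_spec : Claim_equal_compact := by
  intro xs _
  unfold Spec_compact compact
  have h := loop_take (xs.length) xs 0 0 (by omega) (by omega)
  simp only at h
  rw [h]
  simp only [List.take_zero, List.drop_zero, List.nil_append]
  cases xs with
  | nil => simp [pvCollapse, compact_alt]
  | cons a rest => rw [collapse_eq_zip, compact_alt]
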